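-- pv_equiv track=rewrite | github.com/Mister2005/IOS-CN | error_detection.py | correct_hamming_code
-- ===== SOURCE A (Python) =====
-- def correct_hamming_code(received_code):
--     n = len(received_code)
--     r = 0
--     while (2 ** r) < n + 1:
--         r += 1
--
--     error_pos = 0
--     for i in range(r):
--         pos = 2 ** i
--         count = 0
--
--         for x in range(pos - 1, n, 2 * pos):
--             for y in range(x, min(x + pos, n)):
--                 if received_code[y] == '1':
--                     count += 1
--
--         if count % 2 != 0:
--             error_pos += pos
--
--     if error_pos > 0:
--         corrected = list(received_code)
--         corrected[error_pos - 1] = '0' if corrected[error_pos - 1] == '1' else '1'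
--         return ''.join(corrected)
--
--     return received_code
-- ===== SOURCE B (Python) =====
-- def correct_hamming_code(received_code):
--     syndrome = 0
--     for i, c in enumerate(received_code, 1):
--         if c == '1':
--             syndrome ^= i
--     if syndrome == 0:
--         return received_code
--     chars = list(received_code)
--     chars[syndrome - 1] = '0' if chars[syndrome - 1] == '1' else '1'
--     return ''.join(chars)
-- ===== Notes on version B (the rewrite author's own statement) =====
-- stated objective: faster
-- what changed: A computes each parity bit with nested scans over power-of-two strided blocks (O(n log n)); B makes a single pass XORing the 1-based positions of the set characters to get the error syndrome directly (O(n)).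
import Mathlib
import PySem

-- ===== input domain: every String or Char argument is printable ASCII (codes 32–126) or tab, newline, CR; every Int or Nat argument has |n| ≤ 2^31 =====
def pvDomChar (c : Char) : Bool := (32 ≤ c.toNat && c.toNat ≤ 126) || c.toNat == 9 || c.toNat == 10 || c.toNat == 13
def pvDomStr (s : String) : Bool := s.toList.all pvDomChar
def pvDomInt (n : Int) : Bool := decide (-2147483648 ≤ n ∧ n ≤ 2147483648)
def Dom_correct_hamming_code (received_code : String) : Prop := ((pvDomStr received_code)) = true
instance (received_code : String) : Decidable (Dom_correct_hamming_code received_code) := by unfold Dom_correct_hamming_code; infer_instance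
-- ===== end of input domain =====

-- B replaces A's per-parity-bit nested scans (O(n log n)) by a single pass XORing the
-- 1-based positions of '1' characters (O(n)); identical return value wherever A returns.

-- ===== PORT A =====

-- while (2 ** r) < n + 1: r += 1
def pvFindR (n r : Nat) : Nat :=
  if 2 ^ r < n + 1 then pvFindR n (r + 1) else r
termination_by n + 1 - 2 ^ r
decreasing_by
  have h1 : 0 < 2 ^ r := Nat.two_pow_pos r
  have h2 : 2 ^ (r + 1) = 2 * 2 ^ r := by ring
  omega

-- inner loop: for y in range(lo, hi): if received_code[y] == '1': count += 1
def pvInner (cs : List Char) (lo hi : Nat) : Nat :=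
  (List.range' lo (hi - lo)).countP (fun y => cs.getD y ' ' == '1')

-- outer loop: for x in range(pos - 1, n, 2 * pos) with pos = 2 ^ i
def pvOuter (cs : List Char) (n i x : Nat) : Nat :=
  if x < n then
    pvInner cs x (min (x + 2 ^ i) n) + pvOuter cs n i (x + 2 * 2 ^ i)
  else 0
termination_by n - x
decreasing_by
  have h1 : 0 < 2 ^ i := Nat.two_pow_pos i
  omega

def correct_hamming_code (received_code : String) : String :=
  let cs := received_code.toList
  let n := cs.length
  let r := pvFindR n 0
  let error_pos := (List.range r).foldl
    (fun ep i => if pvOuter cs n i (2 ^ i - 1) % 2 ≠ 0 then ep + 2 ^ i else ep) 0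
  if error_pos > 0 then
    String.mk (cs.set (error_pos - 1)
      (if cs.getD (error_pos - 1) ' ' == '1' then '0' else '1'))
  else received_code

-- ===== PORT B =====

-- single pass: XOR of the 1-based indices holding '1'
def pvSyndrome (cs : List Char) : Nat :=
  (List.range cs.length).foldl
    (fun s y => if cs.getD y ' ' == '1' then s ^^^ (y + 1) else s) 0

def correct_hamming_code_alt (received_code : String) : String :=
  let cs := received_code.toList
  let syndrome := pvSyndrome cs
  if syndrome == 0 then received_code
  else
    String.mk (cs.set (syndrome - 1)
      (if cs.getD (syndrome - 1) ' ' == '1' then '0' else '1'))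

-- ===== PRECONDITION & SPEC =====
-- When the syndrome (XOR of the 1-based positions of '1' characters) exceeds the string
-- length, A raises IndexError while flipping (and B raises there too): Pre_ admits exactly
-- the inputs on which A returns, i.e. syndrome ≤ length.
def Pre_correct_hamming_code (received_code : String) : Prop :=
  pvSyndrome received_code.toList ≤ received_code.toList.length
instance (received_code : String) : Decidable (Pre_correct_hamming_code received_code) := by
  unfold Pre_correct_hamming_code; infer_instance

def pvWitness_correct_hamming_code : String := "0110101"

def Spec_correct_hamming_code (received_code : String) (out : String) : Prop := out = correct_hamming_code_alt received_code
instance (received_code : String) (out : String) : Decidable (Spec_correct_hamming_code received_code out) := by unfold Spec_correct_hamming_code; infer_instance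

-- ===== CLAIM (what is proved, stated in full; the proofs are below) =====
def Claim_equal_correct_hamming_code : Prop := ∀ (received_code : String), Dom_correct_hamming_code received_code → Pre_correct_hamming_code received_code → Spec_correct_hamming_code received_code (correct_hamming_code received_code)

-- ===== LEMMAS AND PROOFS =====

-- the per-position predicate that bit i of the syndrome counts
def pvBit (cs : List Char) (i y : Nat) : Bool :=
  (y + 1).testBit i && (cs.getD y ' ' == '1')

theorem testBit_div_mod (n i : Nat) : n.testBit i = decide (n / 2 ^ i % 2 = 1) := by
  rw [Nat.testBit, Nat.shiftRight_eq_div_pow]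
  rcases Nat.mod_two_eq_zero_or_one (n / 2 ^ i) with h | h <;> simp [h]

theorem range'_glue (s a b : Nat) :
    List.range' s a ++ List.range' (s + a) b = List.range' s (a + b) := by
  have := @List.range'_append s a b 1
  simpa using this

-- block arithmetic: positions y with 2*k*p + p - 1 ≤ y < (that)+p have testBit i = true
theorem testBit_block_true (i k y : Nat)
    (h1 : 2 * k * 2 ^ i + (2 ^ i - 1) ≤ y) (h2 : y < 2 * k * 2 ^ i + (2 ^ i - 1) + 2 ^ i) :
    (y + 1).testBit i = true := by
  have hp : 0 < 2 ^ i := Nat.two_pow_pos i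
  have e1 : 2 ^ i * (2 * k + 1) = 2 * (k * 2 ^ i) + 2 ^ i := by ring
  have e2 : 2 * k * 2 ^ i = 2 * (k * 2 ^ i) := by ring
  obtain ⟨d, hdlt, hdy⟩ : ∃ d, d < 2 ^ i ∧ y + 1 = 2 ^ i * (2 * k + 1) + d :=
    ⟨y + 1 - 2 ^ i * (2 * k + 1), by omega, by omega⟩
  rw [testBit_div_mod, hdy, Nat.mul_add_div hp, Nat.div_eq_of_lt hdlt]
  simp [Nat.add_mul_mod_self_left]

theorem testBit_block_false (i k y : Nat)
    (h1 : 2 * k * 2 ^ i + (2 ^ i - 1) + 2 ^ i ≤ y)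
    (h2 : y < 2 * k * 2 ^ i + (2 ^ i - 1) + 2 * 2 ^ i) :
    (y + 1).testBit i = false := by
  have hp : 0 < 2 ^ i := Nat.two_pow_pos i
  have e1 : 2 ^ i * (2 * k + 2) = 2 * (k * 2 ^ i) + 2 * 2 ^ i := by ring
  have e2 : 2 * k * 2 ^ i = 2 * (k * 2 ^ i) := by ring
  obtain ⟨d, hdlt, hdy⟩ : ∃ d, d < 2 ^ i ∧ y + 1 = 2 ^ i * (2 * k + 2) + d :=
    ⟨y + 1 - 2 ^ i * (2 * k + 2), by omega, by omega⟩
  rw [testBit_div_mod, hdy, Nat.mul_add_div hp, Nat.div_eq_of_lt hdlt]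
  simp [Nat.add_mul_mod_self_left]

-- A's double loop for bit i counts exactly the positions satisfying pvBit
theorem pvOuter_count (cs : List Char) (n i : Nat) : ∀ m x k, n - x = m →
    x = 2 * k * 2 ^ i + (2 ^ i - 1) →
    pvOuter cs n i x = (List.range' x (n - x)).countP (pvBit cs i) := by
  intro m
  induction m using Nat.strong_induction_on with
  | _ m IH =>
    intro x k hm hx
    have hp : 0 < 2 ^ i := Nat.two_pow_pos i
    rw [pvOuter]
    by_cases hxn : x < n
    · rw [if_pos hxn]
      by_cases hA : n ≤ x + 2 ^ i
      · have hmin : min (x + 2 ^ i) n = n := by omega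
        have houter0 : pvOuter cs n i (x + 2 * 2 ^ i) = 0 := by
          rw [pvOuter, if_neg (by omega)]
        rw [hmin, houter0, Nat.add_zero]
        unfold pvInner
        apply List.countP_congr
        intro y hy
        have hy' := List.mem_range'_1.mp hy
        unfold pvBit
        rw [testBit_block_true i k y (by omega) (by omega)]
        simp
      · have hmin : min (x + 2 ^ i) n = x + 2 ^ i := by omega
        rw [hmin]
        have hsplit : List.range' x (n - x)
            = List.range' x (2 ^ i) ++ List.range' (x + 2 ^ i) (n - x - 2 ^ i) := by
          rw [range'_glue]; congr 1; omega
        rw [hsplit, List.countP_append]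
        have hchunk1 : pvInner cs x (x + 2 ^ i) = (List.range' x (2 ^ i)).countP (pvBit cs i) := by
          unfold pvInner
          rw [show x + 2 ^ i - x = 2 ^ i from by omega]
          apply List.countP_congr
          intro y hy
          have hy' := List.mem_range'_1.mp hy
          unfold pvBit
          rw [testBit_block_true i k y (by omega) (by omega)]
          simp
        rw [hchunk1]
        congr 1
        by_cases hB : n ≤ x + 2 * 2 ^ i
        · have houter0 : pvOuter cs n i (x + 2 * 2 ^ i) = 0 := by
            rw [pvOuter, if_neg (by omega)]
          rw [houter0]
          symm
          rw [List.countP_eq_zero]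
          intro y hy
          have hy' := List.mem_range'_1.mp hy
          unfold pvBit
          rw [testBit_block_false i k y (by omega) (by omega)]
          simp
        · have hsplit2 : List.range' (x + 2 ^ i) (n - x - 2 ^ i)
              = List.range' (x + 2 ^ i) (2 ^ i) ++ List.range' (x + 2 * 2 ^ i) (n - x - 2 * 2 ^ i) := by
            rw [show x + 2 * 2 ^ i = (x + 2 ^ i) + 2 ^ i from by omega, range'_glue]
            congr 1; omega
          rw [hsplit2, List.countP_append]
          have hz : (List.range' (x + 2 ^ i) (2 ^ i)).countP (pvBit cs i) = 0 := by
            rw [List.countP_eq_zero]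
            intro y hy
            have hy' := List.mem_range'_1.mp hy
            unfold pvBit
            rw [testBit_block_false i k y (by omega) (by omega)]
            simp
          rw [hz, Nat.zero_add]
          have hx' : x + 2 * 2 ^ i = 2 * (k + 1) * 2 ^ i + (2 ^ i - 1) := by
            have e : 2 * (k + 1) * 2 ^ i = 2 * k * 2 ^ i + 2 * 2 ^ i := by ring
            omega
          rw [IH (n - (x + 2 * 2 ^ i)) (by omega) (x + 2 * 2 ^ i) (k + 1) rfl hx',
            show n - (x + 2 * 2 ^ i) = n - x - 2 * 2 ^ i from by omega]
    · rw [if_neg hxn, show n - x = 0 from by omega]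
      simp

-- bit i of the syndrome fold is the parity of the pvBit count
theorem syndrome_testBit (cs : List Char) (i : Nat) : ∀ m s,
    ((List.range m).foldl (fun s y => if cs.getD y ' ' == '1' then s ^^^ (y + 1) else s) s).testBit i
      = xor (s.testBit i) (decide ((List.range m).countP (pvBit cs i) % 2 = 1)) := by
  intro m
  induction m with
  | zero => intro s; simp
  | succ m IH =>
    intro s
    rw [List.range_succ, List.foldl_append, List.countP_append]
    simp only [List.foldl_cons, List.foldl_nil, List.countP_cons, List.countP_nil]
    by_cases hc : cs.getD m ' ' == '1'
    · rw [if_pos hc, Nat.testBit_xor, IH]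
      have hb : pvBit cs i m = (m + 1).testBit i := by
        unfold pvBit; rw [hc, Bool.and_true]
      rw [hb]
      cases htb : (m + 1).testBit i <;>
        rcases Nat.mod_two_eq_zero_or_one ((List.range m).countP (pvBit cs i)) with h | h <;>
        cases hs : s.testBit i <;>
        simp [h, Nat.add_mod, Nat.mod_two_eq_zero_or_one] <;> omega
    · rw [if_neg hc, IH]
      have hb : pvBit cs i m = false := by
        rw [Bool.not_eq_true] at hc
        unfold pvBit; rw [hc, Bool.and_false]
      simp [hb]

-- binary reconstruction of the syndrome from its bits
theorem foldl_bits (s : Nat) : ∀ r a,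
    (List.range r).foldl (fun ep i => if s.testBit i then ep + 2 ^ i else ep) a = a + s % 2 ^ r := by
  intro r
  induction r with
  | zero => intro a; simp [Nat.mod_one]
  | succ r IH =>
    intro a
    rw [List.range_succ, List.foldl_append]
    simp only [List.foldl_cons, List.foldl_nil]
    have hmm : s % 2 ^ (r + 1) = s % 2 ^ r + 2 ^ r * (s / 2 ^ r % 2) := by
      rw [pow_succ, Nat.mod_mul]
    rw [IH, testBit_div_mod, hmm]
    rcases Nat.mod_two_eq_zero_or_one (s / 2 ^ r) with h | h <;> simp [h] <;> omega

theorem pvFindR_ge_aux (n : Nat) : ∀ m r, n + 1 - 2 ^ r = m → n + 1 ≤ 2 ^ pvFindR n r := by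
  intro m
  induction m using Nat.strong_induction_on with
  | _ m IH =>
    intro r hm
    rw [pvFindR]
    by_cases h : 2 ^ r < n + 1
    · rw [if_pos h]
      have h2 : 2 ^ (r + 1) = 2 * 2 ^ r := by ring
      have h1 : 0 < 2 ^ r := Nat.two_pow_pos r
      exact IH (n + 1 - 2 ^ (r + 1)) (by omega) (r + 1) rfl
    · rw [if_neg h]; omega

theorem pvFindR_ge (n r : Nat) : n + 1 ≤ 2 ^ pvFindR n r :=
  pvFindR_ge_aux n (n + 1 - 2 ^ r) r rfl

theorem syndrome_lt_aux (cs : List Char) (r : Nat) (h : cs.length < 2 ^ r) : ∀ m, m ≤ cs.length →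
    ((List.range m).foldl (fun s y => if cs.getD y ' ' == '1' then s ^^^ (y + 1) else s) 0) < 2 ^ r := by
  intro m
  induction m with
  | zero => intro _; simpa using Nat.two_pow_pos r
  | succ m IH =>
    intro hm
    rw [List.range_succ, List.foldl_append]
    simp only [List.foldl_cons, List.foldl_nil]
    by_cases hc : cs.getD m ' ' == '1'
    · rw [if_pos hc]
      exact Nat.xor_lt_two_pow (IH (by omega)) (by omega)
    · rw [if_neg hc]
      exact IH (by omega)

theorem syndrome_lt (cs : List Char) (r : Nat) (h : cs.length < 2 ^ r) :
    pvSyndrome cs < 2 ^ r :=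
  syndrome_lt_aux cs r h cs.length le_rfl

theorem testBit_small (i y : Nat) (h : y + 1 < 2 ^ i) : (y + 1).testBit i = false := by
  rw [testBit_div_mod, Nat.div_eq_of_lt h]
  simp

-- A's count for bit i, rebased to the full index range [0, n)
theorem count_range_eq (cs : List Char) (i : Nat) :
    pvOuter cs cs.length i (2 ^ i - 1) = (List.range cs.length).countP (pvBit cs i) := by
  have hp : 0 < 2 ^ i := Nat.two_pow_pos i
  rw [pvOuter_count cs cs.length i _ (2 ^ i - 1) 0 rfl (by omega), List.range_eq_range']
  by_cases hx : 2 ^ i - 1 ≤ cs.length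
  · have hsplit : List.range' 0 cs.length
        = List.range' 0 (2 ^ i - 1) ++ List.range' (2 ^ i - 1) (cs.length - (2 ^ i - 1)) := by
      calc List.range' 0 cs.length
          = List.range' 0 ((2 ^ i - 1) + (cs.length - (2 ^ i - 1))) := by congr 1; omega
        _ = _ := by rw [← range'_glue, Nat.zero_add]
    rw [hsplit, List.countP_append]
    have hz : (List.range' 0 (2 ^ i - 1)).countP (pvBit cs i) = 0 := by
      rw [List.countP_eq_zero]
      intro y hy
      have hy' := List.mem_range'_1.mp hy
      unfold pvBit
      rw [testBit_small i y (by omega)]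
      simp
    rw [hz, Nat.zero_add]
  · rw [show cs.length - (2 ^ i - 1) = 0 from by omega]
    simp only [List.range'_zero, List.countP_nil]
    symm
    rw [List.countP_eq_zero]
    intro y hy
    have hy' := List.mem_range'_1.mp hy
    unfold pvBit
    rw [testBit_small i y (by omega)]
    simp

-- the test A performs for bit i is exactly "bit i of the syndrome is set"
theorem outer_vs_bit (cs : List Char) (i : Nat) :
    (pvOuter cs cs.length i (2 ^ i - 1) % 2 ≠ 0) ↔ (pvSyndrome cs).testBit i = true := by
  have hbit : (pvSyndrome cs).testBit i
      = decide ((List.range cs.length).countP (pvBit cs i) % 2 = 1) := by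
    have := syndrome_testBit cs i cs.length 0
    simpa [pvSyndrome] using this
  rw [count_range_eq, hbit]
  rcases Nat.mod_two_eq_zero_or_one ((List.range cs.length).countP (pvBit cs i)) with h | h <;>
    simp [h]

theorem error_pos_eq_syndrome (cs : List Char) :
    (List.range (pvFindR cs.length 0)).foldl
      (fun ep i => if pvOuter cs cs.length i (2 ^ i - 1) % 2 ≠ 0 then ep + 2 ^ i else ep) 0
      = pvSyndrome cs := by
  have hr := pvFindR_ge cs.length 0
  have hsyn : pvSyndrome cs < 2 ^ pvFindR cs.length 0 := syndrome_lt cs _ (by omega)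
  have hfun : (fun ep i => if pvOuter cs cs.length i (2 ^ i - 1) % 2 ≠ 0 then ep + 2 ^ i else ep)
      = (fun ep i => if (pvSyndrome cs).testBit i then ep + 2 ^ i else ep) := by
    funext ep i
    by_cases h : pvOuter cs cs.length i (2 ^ i - 1) % 2 ≠ 0
    · rw [if_pos h, if_pos ((outer_vs_bit cs i).mp h)]
    · rw [if_neg h]
      have : (pvSyndrome cs).testBit i ≠ true := fun hb => h ((outer_vs_bit cs i).mpr hb)
      simp [this]
  rw [hfun, foldl_bits, Nat.zero_add, Nat.mod_eq_of_lt hsyn]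

-- ===== VERDICT (by name: the statement is the Claim_ definition above) =====
theorem correct_hamming_code_spec : Claim_equal_correct_hamming_code := by
  intro s _ hpre
  unfold Spec_correct_hamming_code correct_hamming_code correct_hamming_code_alt
  simp only [error_pos_eq_syndrome]
  rcases Nat.eq_zero_or_pos (pvSyndrome s.toList) with h | h
  · simp [h]
  · have h0 : pvSyndrome s.toList ≠ 0 := by omega
    simp [h0, h]
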